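-- pv_equiv track=rewrite | github.com/wlpinjlte/Algorithms-and-Datastructures | asd_dynamiki/zad1/zad1k.py | f
-- ===== SOURCE A (Python) =====
-- def f(i,j,F,S):
--     if F[i][j]!=None:
--         return F[i][j]
--     if i==j:
--         if int(S[i])==1:
--             F[i][j]=1
--         else:
--             F[i][j]=-1
--         return F[i][j]
--     if int(S[j])==1:
--         F[i][j]=f(i,j-1,F,S)+1
--     else:
--         F[i][j] = f(i, j - 1, F, S) -1
--     return F[i][j]
-- ===== SOURCE B (Python) =====
-- def f(i, j, F, S):
--     row = F[i]
--     if row[j] is not None: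
--         return row[j]
--     m = j
--     while m > i and row[m] is None:
--         m -= 1
--     if row[m] is not None:
--         acc = row[m]
--     else:
--         acc = 1 if int(S[i]) == 1 else -1
--         row[i] = acc
--     for k in range(m + 1, j + 1):
--         acc = acc + 1 if int(S[k]) == 1 else acc - 1
--         row[k] = acc
--     return acc
-- ===== Notes on version B (the rewrite author's own statement) =====
-- stated objective: alternative
-- what changed: Replaces A's memoized top-down recursion with an iterative two-phase loop: scan downward to the first already-memoized entry (or the base index), then accumulate the signed counts upward, filling exactly the memo cells A would fill.
-- outside the precondition, e.g. on f(1, 0, [[None], [None, 7]], '11'): A returns 8, B returns 1; on f(0, -1, [[7, None]], '10'): A returns 6, B returns 1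
import Mathlib
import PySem

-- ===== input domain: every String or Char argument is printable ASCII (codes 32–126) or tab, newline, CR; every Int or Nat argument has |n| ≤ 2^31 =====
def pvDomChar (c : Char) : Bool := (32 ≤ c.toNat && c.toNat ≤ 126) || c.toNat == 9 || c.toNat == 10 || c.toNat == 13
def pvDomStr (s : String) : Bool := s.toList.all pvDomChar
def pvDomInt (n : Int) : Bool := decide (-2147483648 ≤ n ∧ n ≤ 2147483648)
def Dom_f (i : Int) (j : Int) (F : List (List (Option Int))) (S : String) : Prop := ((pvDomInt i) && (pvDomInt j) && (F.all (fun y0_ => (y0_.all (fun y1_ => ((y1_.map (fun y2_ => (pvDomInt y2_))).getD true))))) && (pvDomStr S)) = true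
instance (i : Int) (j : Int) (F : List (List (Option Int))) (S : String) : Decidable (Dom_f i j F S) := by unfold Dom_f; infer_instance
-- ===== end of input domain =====

-- B replaces A's memoized top-down recursion by an iterative two-phase loop (scan down to the
-- first memoized entry or the base, then accumulate upward), filling the same memo cells;
-- both Pythons mutate F identically on Pre_, and the equivalence proved is about the return value.

-- ===== PORT A =====
-- A's recursion on j can only run for (j - i) + 1 levels before it returns inside Pre_f
-- (memo hit or base case i == j), so it is ported with that much fuel; fuel exhaustion
-- (value 0) is unreachable on inputs satisfying Pre_f.
def fGoA (i : Int) (F : List (List (Option Int))) (S : String) : Nat → Int → Int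
  | 0, _ => 0
  | fuel+1, j =>
    match (PySem.List.pyGet? F i).bind (fun row => PySem.List.pyGet? row j) with
    | some (some v) => v    -- if F[i][j] != None: return F[i][j]
    | _ =>                  -- entry is None (index errors are excluded by Pre_f)
      if i = j then
        if (PySem.Str.pyGet? S i).bind (fun c => PySem.Int.ofChars? [c]) = some 1 then 1 else -1
      else if (PySem.Str.pyGet? S j).bind (fun c => PySem.Int.ofChars? [c]) = some 1 then
        fGoA i F S fuel (j - 1) + 1
      else
        fGoA i F S fuel (j - 1) - 1

def f (i : Int) (j : Int) (F : List (List (Option Int))) (S : String) : Int :=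
  fGoA i F S ((j - i).toNat + 1) j

-- ===== PORT B =====
-- while m > i and row[m] is None: m -= 1   (the loop runs at most (j - i) times inside Pre_f)
def scanDownB (i : Int) (row : List (Option Int)) : Nat → Int → Int
  | 0, m => m
  | fuel+1, m =>
    if i < m ∧ PySem.List.pyGet? row m = some none then scanDownB i row fuel (m - 1) else m

def f_alt (i : Int) (j : Int) (F : List (List (Option Int))) (S : String) : Int :=
  match PySem.List.pyGet? F i with
  | none => 0               -- row = F[i] raises IndexError in Python; outside Pre_f
  | some row =>
    match PySem.List.pyGet? row j with
    | some (some v) => v    -- if row[j] is not None: return row[j]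
    | _ =>
      let m := scanDownB i row (j - i).toNat j
      let acc0 :=
        match PySem.List.pyGet? row m with
        | some (some v) => v
        | _ => if (PySem.Str.pyGet? S i).bind (fun c => PySem.Int.ofChars? [c]) = some 1 then 1 else -1
      (PySem.List.pyRange (m + 1) (j + 1)).foldl
        (fun acc k =>
          if (PySem.Str.pyGet? S k).bind (fun c => PySem.Int.ofChars? [c]) = some 1 then acc + 1
          else acc - 1) acc0

-- ===== PRECONDITION & SPEC =====
-- Pre_f excludes (a) inputs where A raises (an index out of range with no memo hit at F[i][j],
-- or a consulted character of S that is not a digit), and (b) inputs where A returns only via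
-- Python's accidental negative-index wraparound or via a memo entry below a degenerate query
-- j < i — corner values that are artefacts of A's indexing, except that a direct memo hit at
-- F[i][j] (under Python indexing, wrapped or not) is kept inside Pre_f since both programs
-- simply return it.
def Pre_f (i : Int) (j : Int) (F : List (List (Option Int))) (S : String) : Prop :=
  ((PySem.List.pyGet? F i).bind (fun row => PySem.List.pyGet? row j)).join ≠ none ∨
  (0 ≤ i ∧ i ≤ j ∧ i < (F.length : Int) ∧ j < ((F.getD i.toNat []).length : Int) ∧
    ∀ k : Nat, k < j.toNat + 1 → i.toNat ≤ k →
      ((∀ k' : Nat, k' < j.toNat + 1 → k ≤ k' → (F.getD i.toNat []).getD k' none = none) →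
        k < S.toList.length ∧ (S.toList.getD k ' ').isDigit = true))
instance (i : Int) (j : Int) (F : List (List (Option Int))) (S : String) : Decidable (Pre_f i j F S) := by unfold Pre_f; infer_instance

def pvWitness_f : Int × Int × List (List (Option Int)) × String := (0, 1, [[none, none]], "10")

def Spec_f (i : Int) (j : Int) (F : List (List (Option Int))) (S : String) (out : Int) : Prop := out = f_alt i j F S
instance (i : Int) (j : Int) (F : List (List (Option Int))) (S : String) (out : Int) : Decidable (Spec_f i j F S out) := by unfold Spec_f; infer_instance

-- ===== CLAIM (what is proved, stated in full; the proofs are below) =====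
def Claim_equal_f : Prop := ∀ (i : Int) (j : Int) (F : List (List (Option Int))) (S : String), Dom_f i j F S → Pre_f i j F S → Spec_f i j F S (f i j F S)

-- ===== LEMMAS AND PROOFS =====

-- the signed contribution of position k, as both ports compute it
def sg (S : String) (k : Int) : Int :=
  if (PySem.Str.pyGet? S k).bind (fun c => PySem.Int.ofChars? [c]) = some 1 then 1 else -1

lemma scan_le (i : Int) (row : List (Option Int)) :
    ∀ (fuel : Nat) (m : Int), i ≤ m → i ≤ scanDownB i row fuel m ∧ scanDownB i row fuel m ≤ m := by
  intro fuel
  induction fuel with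
  | zero => intro m hm; simp [scanDownB]; omega
  | succ n ih =>
    intro m hm
    by_cases h : i < m ∧ PySem.List.pyGet? row m = some none
    · have := ih (m - 1) (by omega)
      simp [scanDownB, h]; omega
    · simp [scanDownB, h]; omega

lemma scan_stop (i : Int) (row : List (Option Int)) (fuel : Nat) (m : Int)
    (h : ¬ (i < m ∧ PySem.List.pyGet? row m = some none)) :
    scanDownB i row fuel m = m := by
  cases fuel with
  | zero => rfl
  | succ n => simp [scanDownB, h]

lemma alt_memo (i j : Int) (F : List (List (Option Int))) (S : String) (row : List (Option Int)) (v : Int)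
    (hF : PySem.List.pyGet? F i = some row) (hj : PySem.List.pyGet? row j = some (some v)) :
    f_alt i j F S = v := by
  simp [f_alt, hF, hj]

lemma alt_base (i : Int) (F : List (List (Option Int))) (S : String) (row : List (Option Int))
    (hF : PySem.List.pyGet? F i = some row) (hi : PySem.List.pyGet? row i = some none) :
    f_alt i i F S = sg S i := by
  simp [f_alt, hF, hi, scanDownB, PySem.List.pyRange, sg]

lemma alt_step (i j : Int) (F : List (List (Option Int))) (S : String) (row : List (Option Int))
    (hF : PySem.List.pyGet? F i = some row) (h0i : 0 ≤ i) (hij : i < j)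
    (hlen : j < (row.length : Int)) (hj : PySem.List.pyGet? row j = some none) :
    f_alt i j F S = f_alt i (j - 1) F S + sg S j := by
  have hfuel : (j - i).toNat = (j - 1 - i).toNat + 1 := by omega
  have hscan : scanDownB i row (j - i).toNat j = scanDownB i row (j - 1 - i).toNat (j - 1) := by
    rw [hfuel]; simp [scanDownB, hij, hj]
  have hprev : PySem.List.pyGet? row (j - 1) = some (row[(j - 1).toNat]'(by omega)) :=
    PySem.List.pyGet?_eq_some_getElem row (by omega) (by omega)
  rcases he : row[(j - 1).toNat]'(by omega) with _ | v
  · -- row[j-1] is None : both sides scan from j-1 with equal fuel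
    rw [he] at hprev
    have hm := scan_le i row (j - 1 - i).toNat (j - 1) (by omega)
    set m := scanDownB i row (j - 1 - i).toNat (j - 1) with hmdef
    have hrange : PySem.List.pyRange (m + 1) (j + 1) = PySem.List.pyRange (m + 1) j ++ [j] := by
      have : j = (j - 1) + 1 := by omega
      exact PySem.List.pyRange_one_succ_right (by omega)
    simp only [f_alt, hF, hj, hprev, hscan, ← hmdef, hrange, List.foldl_append, List.foldl_cons,
      List.foldl_nil]
    cases hc : decide ((PySem.Str.pyGet? S j).bind (fun c => PySem.Int.ofChars? [c]) = some 1) <;>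
      (simp_all [sg]; try omega)
  · -- row[j-1] is a memo hit v : the scan stops at j-1 immediately
    rw [he] at hprev
    have hstop : scanDownB i row (j - 1 - i).toNat (j - 1) = j - 1 :=
      scan_stop _ _ _ _ (by simp [hprev])
    have hrange : PySem.List.pyRange (j - 1 + 1) (j + 1) = PySem.List.pyRange (j - 1 + 1) j ++ [j] :=
      PySem.List.pyRange_one_succ_right (by omega)
    have hnil : PySem.List.pyRange (j - 1 + 1) j = [] := by
      have : j - 1 + 1 = j := by omega
      rw [this]; simp [PySem.List.pyRange]
    rw [alt_memo i (j-1) F S row v hF hprev]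
    simp only [f_alt, hF, hj, hscan, hstop, hprev, hrange, hnil, List.nil_append,
      List.foldl_cons, List.foldl_nil]
    cases hc : decide ((PySem.Str.pyGet? S j).bind (fun c => PySem.Int.ofChars? [c]) = some 1) <;>
      (simp_all [sg]; try omega)

lemma A_eq_alt (i : Int) (F : List (List (Option Int))) (S : String) (row : List (Option Int))
    (hF : PySem.List.pyGet? F i = some row) (h0i : 0 ≤ i) :
    ∀ (fuel : Nat) (j : Int), i ≤ j → j < (row.length : Int) → (j - i).toNat < fuel →
      fGoA i F S fuel j = f_alt i j F S := by
  intro fuel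
  induction fuel with
  | zero => intro j _ _ h; omega
  | succ n ih =>
    intro j hij hlen _
    have hget : PySem.List.pyGet? row j = some (row[j.toNat]'(by omega)) :=
      PySem.List.pyGet?_eq_some_getElem row (by omega) (by omega)
    rcases he : row[j.toNat]'(by omega) with _ | v
    · rw [he] at hget
      rcases eq_or_lt_of_le hij with heq | hlt
      · subst heq
        rw [alt_base i F S row hF hget]
        simp [fGoA, hF, hget, sg]
      · have hrec : fGoA i F S (n+1) j =
            (if (PySem.Str.pyGet? S j).bind (fun c => PySem.Int.ofChars? [c]) = some 1 then
              fGoA i F S n (j - 1) + 1 else fGoA i F S n (j - 1) - 1) := by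
          simp [fGoA, hF, hget]; intro h; omega
        rw [hrec, ih (j - 1) (by omega) (by omega) (by omega),
          alt_step i j F S row hF h0i hlt hlen hget]
        unfold sg
        split_ifs <;> omega
    · rw [he] at hget
      rw [alt_memo i j F S row v hF hget]
      simp [fGoA, hF, hget]

-- ===== VERDICT (by name: the statement is the Claim_ definition above) =====
theorem f_spec : Claim_equal_f := by
  intro i j F S _ hpre
  unfold Spec_f
  rcases hpre with h1 | ⟨h0i, hij, hiF, hjlen, _⟩
  · rcases hF : PySem.List.pyGet? F i with _ | row
    · rw [hF] at h1; simp at h1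
    · rcases hrj : PySem.List.pyGet? row j with _ | e
      · rw [hF] at h1; simp [hrj] at h1
      · rcases e with _ | v
        · rw [hF] at h1; simp [hrj] at h1
        · rw [alt_memo i j F S row v hF hrj]
          simp [f, fGoA, hF, hrj]
  · have hiN : i.toNat < F.length := by omega
    have hF : PySem.List.pyGet? F i = some (F.getD i.toNat []) := by
      rw [PySem.List.pyGet?_of_nonneg F h0i, List.getElem?_eq_getElem hiN,
        List.getD_eq_getElem F [] hiN]
    rw [f]
    exact A_eq_alt i F S (F.getD i.toNat []) hF h0i ((j - i).toNat + 1) j hij hjlen (by omega)
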